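-- pv_equiv track=rewrite | github.com/alievbaxtiyor/foundationCodes | month 4/lesson4/home_work/problem4.py | ketmaketlik3_juft
-- ===== SOURCE A (Python) =====
-- def ketmaketlik3_juft(arr):
--     ketmaketJuft = 0
--
--     for num in arr:
--         if num % 2 != 0:
--             ketmaketJuft += 1
--             if ketmaketJuft == 3:
--                 return True
--         else:
--             ketmaketJuft = 0
--     return False
-- ===== SOURCE B (Python) =====
-- def ketmaketlik3_juft(arr):
--     return any(a % 2 != 0 and b % 2 != 0 and c % 2 != 0
--                for a, b, c in zip(arr, arr[1:], arr[2:]))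
-- ===== Notes on version B (the rewrite author's own statement) =====
-- stated objective: idiomatic
-- what changed: Replaces the running streak counter with early return by a sliding 3-window test: zip the list with its two shifted copies and ask any() whether some window is all odd.
import Mathlib
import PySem

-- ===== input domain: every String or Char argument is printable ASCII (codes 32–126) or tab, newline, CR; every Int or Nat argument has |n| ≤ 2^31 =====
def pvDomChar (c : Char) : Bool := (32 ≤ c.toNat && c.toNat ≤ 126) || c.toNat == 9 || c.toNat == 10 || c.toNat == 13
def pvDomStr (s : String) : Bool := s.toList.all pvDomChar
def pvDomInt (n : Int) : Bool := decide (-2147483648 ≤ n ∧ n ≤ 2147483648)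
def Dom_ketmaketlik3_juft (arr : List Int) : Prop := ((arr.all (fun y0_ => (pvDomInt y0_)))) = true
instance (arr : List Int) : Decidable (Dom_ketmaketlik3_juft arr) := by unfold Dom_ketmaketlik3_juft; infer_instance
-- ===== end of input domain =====

-- B replaces A's running streak counter with a sliding 3-window any() over the list
-- zipped with its two shifted copies (idiomatic; same O(n) cost; return value only).

-- ===== PORT A =====
-- the for-loop with the counter and the early 'return True'
def ketmaketlik3_juftGo : List Int → Int → Bool
  | [], _ => false
  | num :: rest, k =>
    if num % 2 ≠ 0 then
      if k + 1 == 3 then true else ketmaketlik3_juftGo rest (k + 1)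
    else ketmaketlik3_juftGo rest 0

def ketmaketlik3_juft (arr : List Int) : Bool :=
  ketmaketlik3_juftGo arr 0

-- ===== PORT B =====
-- zip(arr, arr[1:], arr[2:]) with any(); arr[1:], arr[2:] are List.drop 1 / drop 2
def ketmaketlik3_juft_alt (arr : List Int) : Bool :=
  (arr.zip ((arr.drop 1).zip (arr.drop 2))).any
    (fun p => decide (p.1 % 2 ≠ 0) && decide (p.2.1 % 2 ≠ 0) && decide (p.2.2 % 2 ≠ 0))

-- ===== PRECONDITION & SPEC =====
def Spec_ketmaketlik3_juft (arr : List Int) (out : Bool) : Prop := out = ketmaketlik3_juft_alt arr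
instance (arr : List Int) (out : Bool) : Decidable (Spec_ketmaketlik3_juft arr out) := by unfold Spec_ketmaketlik3_juft; infer_instance

-- ===== CLAIM (what is proved, stated in full; the proofs are below) =====
def Claim_equal_ketmaketlik3_juft : Prop := ∀ (arr : List Int), Dom_ketmaketlik3_juft arr → Spec_ketmaketlik3_juft arr (ketmaketlik3_juft arr)

-- ===== LEMMAS AND PROOFS =====

-- parity pattern of the list
def pvOddb (n : Int) : Bool := decide (n % 2 ≠ 0)

-- "some 3 consecutive trues" on a Bool list, the common reference form
def pvW3 : List Bool → Bool
  | a :: b :: c :: t => (a && b && c) || pvW3 (b :: c :: t)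
  | _ => false

theorem pvW3_false_cons (l : List Bool) : pvW3 (false :: l) = pvW3 l := by
  match l with
  | [] => rfl
  | [b] => rfl
  | b :: c :: t => simp [pvW3]

theorem pvW3_tf_cons (l : List Bool) : pvW3 (true :: false :: l) = pvW3 l := by
  match l with
  | [] => rfl
  | c :: t => simp [pvW3, pvW3_false_cons]

theorem pvW3_ttf_cons (l : List Bool) : pvW3 (true :: true :: false :: l) = pvW3 l := by
  simp [pvW3, pvW3_tf_cons]

-- A's loop computes pvW3 on k leading trues (the trailing odd streak) ++ the parity pattern
theorem go_eq_w3 (arr : List Int) : ∀ k : Int, (k = 0 ∨ k = 1 ∨ k = 2) →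
    ketmaketlik3_juftGo arr k = pvW3 (List.replicate k.toNat true ++ arr.map pvOddb) := by
  induction arr with
  | nil =>
    rintro k (rfl | rfl | rfl) <;> rfl
  | cons a rest ih =>
    rintro k hk
    by_cases ha : a % 2 ≠ 0
    · rcases hk with rfl | rfl | rfl
      · have := ih 1 (by omega)
        simp only [ketmaketlik3_juftGo, if_pos ha] at *
        simpa [pvOddb, ha, List.replicate] using this
      · have := ih 2 (by omega)
        simp only [ketmaketlik3_juftGo, if_pos ha] at *
        simpa [pvOddb, ha, List.replicate] using this
      · simp [ketmaketlik3_juftGo, pvOddb, ha, List.replicate, pvW3]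
    · have := ih 0 (by omega)
      have hb : pvOddb a = false := by simp [pvOddb]; omega
      rcases hk with rfl | rfl | rfl <;>
        simp [ketmaketlik3_juftGo, ha, hb, List.replicate, pvW3_false_cons,
          pvW3_tf_cons, pvW3_ttf_cons, this]

-- B's zip-any unfolds one window at a time
theorem alt_cons (a : Int) (rest : List Int) :
    ketmaketlik3_juft_alt (a :: rest) =
      ((match rest with
        | b :: c :: _ => decide (a % 2 ≠ 0) && decide (b % 2 ≠ 0) && decide (c % 2 ≠ 0)
        | _ => false) || ketmaketlik3_juft_alt rest) := by
  match rest with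
  | [] => rfl
  | [b] => rfl
  | b :: c :: t => simp [ketmaketlik3_juft_alt]

theorem alt_eq_w3 (arr : List Int) : ketmaketlik3_juft_alt arr = pvW3 (arr.map pvOddb) := by
  induction arr with
  | nil => rfl
  | cons a rest ih =>
    rw [alt_cons, ih]
    match rest with
    | [] => rfl
    | [b] => rfl
    | b :: c :: t => simp [pvW3, pvOddb]

-- ===== VERDICT (by name: the statement is the Claim_ definition above) =====
theorem ketmaketlik3_juft_spec : Claim_equal_ketmaketlik3_juft := by
  intro arr _
  unfold Spec_ketmaketlik3_juft ketmaketlik3_juft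
  rw [alt_eq_w3, go_eq_w3 arr 0 (by omega)]
  rfl
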